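-- pv_equiv track=rewrite | github.com/adelmeleka/ImageSegmentation | main.py | purityOfEachClass
-- ===== SOURCE A (Python) =====
-- def purityOfEachClass(labels,groundTruth2,k=3,sorted = True):
--     groundTruthLabesNumber = 0
--     for i in range(len(groundTruth2)):
--         if groundTruthLabesNumber < groundTruth2[i]:
--             groundTruthLabesNumber = groundTruth2[i]
--     groundTruthLabesNumber +=1
--     dataInClusterindexies = []
--     for i in range(k):
--         dataInClusterindexies.append([])
--     for i in range(len(groundTruth2)):
--         dataInClusterindexies[labels[i]].append(i)
--     listNij = []
--     for i in range(k):
--         list = [0] * (groundTruthLabesNumber)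
--         listNij.append(list)
--
--     for i in range(k):
--         for j in range(len(dataInClusterindexies[i])):
--             listNij[i][groundTruth2[dataInClusterindexies[i][j]]] += 1
--     finalListNij = []
--     for i in range(k):
--         list = [0] * (groundTruthLabesNumber)
--         finalListNij.append(list)
--
--     for i in range(k):
--         for j in range(groundTruthLabesNumber):
--             finalListNij[i][j] = (listNij[i][j],j+1)
--
--     if sorted == True:
--         for i in range(k):
--             finalListNij[i].sort(reverse=True)
--
--     groundtruthList = [0] * (groundTruthLabesNumber)
--
--     for i in range(k):
--         for j in range(groundTruthLabesNumber):
--             listNij[i][j] = finalListNij[i][j][0]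
--
--     for j in range(groundTruthLabesNumber):
--         sum = 0
--         for i in range(k):
--             sum += finalListNij[i][j][0]
--         groundtruthList[j] = sum
--
--     return listNij,groundtruthList,groundTruthLabesNumber
-- ===== SOURCE B (Python) =====
-- def purityOfEachClass(labels, groundTruth2, k=3, sorted=True):
--     L = max([0, *groundTruth2]) + 1
--     matrix = [[0] * L for _ in range(k)]
--     for lab, g in zip(labels, groundTruth2):
--         matrix[lab][g] += 1
--     rows = [[(c, j + 1) for j, c in enumerate(row)] for row in matrix]
--     if sorted == True:
--         for row in rows:
--             row.sort(reverse=True)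
--     counts = [[t[0] for t in row] for row in rows]
--     groundtruthList = [sum(row[j] for row in counts) for j in range(L)]
--     return counts, groundtruthList, L
-- ===== Notes on version B (the rewrite author's own statement) =====
-- stated objective: simpler
-- what changed: B drops A's bucket-grouping pass (indices grouped per cluster, then counted) and all of A's index-assignment loops, instead counting directly in one pass over zip(labels, groundTruth2) and building the tuple rows, count rows and column sums with comprehensions.
import Mathlib
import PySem

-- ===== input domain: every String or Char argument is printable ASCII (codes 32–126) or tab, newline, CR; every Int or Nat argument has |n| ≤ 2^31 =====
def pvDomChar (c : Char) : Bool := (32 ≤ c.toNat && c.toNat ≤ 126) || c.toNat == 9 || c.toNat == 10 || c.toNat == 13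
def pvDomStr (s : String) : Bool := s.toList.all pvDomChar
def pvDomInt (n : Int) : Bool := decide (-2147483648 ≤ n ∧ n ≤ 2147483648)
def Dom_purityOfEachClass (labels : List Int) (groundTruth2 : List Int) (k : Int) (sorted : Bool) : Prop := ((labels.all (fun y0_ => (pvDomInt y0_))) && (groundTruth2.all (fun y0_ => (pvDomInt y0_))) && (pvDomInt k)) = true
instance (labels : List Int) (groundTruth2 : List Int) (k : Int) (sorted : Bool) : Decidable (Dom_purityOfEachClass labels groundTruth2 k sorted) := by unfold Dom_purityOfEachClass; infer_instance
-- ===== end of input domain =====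

-- B replaces A's bucket-grouping pass and its index-assignment loops by one direct
-- counting pass over zip(labels, groundTruth2) and by maps/comprehensions (objective: simpler).
-- shared helper: Python "row[j] += 1" (used by both ports)
def pvBumpRow (row : List Int) (j : Int) : List Int :=
  PySem.List.pySetD row j (PySem.List.pyGetD row j 0 + 1)

-- ===== PORT A =====
def purityOfEachClass (labels : List Int) (groundTruth2 : List Int) (k : Int) (sorted : Bool) : List (List Int) × List Int × Int :=
  let n : Int := groundTruth2.length
  let gtl : Int :=
    (PySem.List.pyRange 0 n 1).foldl
      (fun acc i => if acc < PySem.List.pyGetD groundTruth2 i 0 then PySem.List.pyGetD groundTruth2 i 0 else acc) 0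
  let gtl := gtl + 1
  let dic : List (List Int) := (PySem.List.pyRange 0 k 1).foldl (fun acc _ => acc ++ [([] : List Int)]) []
  let dic := (PySem.List.pyRange 0 n 1).foldl
      (fun acc i => PySem.List.pySetD acc (PySem.List.pyGetD labels i 0)
          ((PySem.List.pyGetD acc (PySem.List.pyGetD labels i 0) []) ++ [i])) dic
  let listNij : List (List Int) := (PySem.List.pyRange 0 k 1).foldl
      (fun acc _ => acc ++ [List.replicate gtl.toNat 0]) []
  let listNij := (PySem.List.pyRange 0 k 1).foldl
      (fun acc i => (PySem.List.pyRange 0 ((PySem.List.pyGetD dic i []).length : Int) 1).foldl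
          (fun acc2 j =>
            PySem.List.pySetD acc2 i
              (pvBumpRow (PySem.List.pyGetD acc2 i [])
                 (PySem.List.pyGetD groundTruth2 (PySem.List.pyGetD (PySem.List.pyGetD dic i []) j 0) 0)))
          acc) listNij
  -- Python fills the rows below with int 0 placeholders and then overwrites every cell with a
  -- pair; the typed port uses (0, 0) placeholders, likewise all overwritten.
  let finalListNij : List (List (Int × Int)) := (PySem.List.pyRange 0 k 1).foldl
      (fun acc _ => acc ++ [List.replicate gtl.toNat ((0 : Int), (0 : Int))]) []
  let finalListNij := (PySem.List.pyRange 0 k 1).foldl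
      (fun acc i => (PySem.List.pyRange 0 gtl 1).foldl
          (fun acc2 j =>
            PySem.List.pySetD acc2 i
              (PySem.List.pySetD (PySem.List.pyGetD acc2 i [])
                 j (PySem.List.pyGetD (PySem.List.pyGetD listNij i []) j 0, j + 1)))
          acc) finalListNij
  let finalListNij := if sorted == true then
      (PySem.List.pyRange 0 k 1).foldl
        (fun acc i => PySem.List.pySetD acc i
            (PySem.List.sorted2 (PySem.List.pyGetD acc i []) Prod.fst Prod.snd true)) finalListNij
    else finalListNij
  let groundtruthList : List Int := List.replicate gtl.toNat 0
  let listNij := (PySem.List.pyRange 0 k 1).foldl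
      (fun acc i => (PySem.List.pyRange 0 gtl 1).foldl
          (fun acc2 j =>
            PySem.List.pySetD acc2 i
              (PySem.List.pySetD (PySem.List.pyGetD acc2 i [])
                 j (PySem.List.pyGetD (PySem.List.pyGetD finalListNij i []) j (0, 0)).1))
          acc) listNij
  let groundtruthList := (PySem.List.pyRange 0 gtl 1).foldl
      (fun acc j =>
        PySem.List.pySetD acc j
          ((PySem.List.pyRange 0 k 1).foldl
            (fun s i => s + (PySem.List.pyGetD (PySem.List.pyGetD finalListNij i []) j (0, 0)).1) 0))
      groundtruthList
  (listNij, groundtruthList, gtl)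

-- ===== PORT B =====
def purityOfEachClass_alt (labels : List Int) (groundTruth2 : List Int) (k : Int) (sorted : Bool) : List (List Int) × List Int × Int :=
  let L : Int := ((PySem.List.max? ((0 : Int) :: groundTruth2) (fun y => y)).getD 0) + 1
  let matrix : List (List Int) := (PySem.List.pyRange 0 k 1).map (fun _ => List.replicate L.toNat 0)
  let matrix := (labels.zip groundTruth2).foldl
      (fun m p => PySem.List.pySetD m p.1 (pvBumpRow (PySem.List.pyGetD m p.1 []) p.2)) matrix
  let rows : List (List (Int × Int)) := matrix.map (fun row =>
      (PySem.List.enumerate row 0).map (fun jc => (jc.2, jc.1 + 1)))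
  let rows := if sorted == true then rows.map (fun r => PySem.List.sorted2 r Prod.fst Prod.snd true) else rows
  let counts : List (List Int) := rows.map (fun r => r.map Prod.fst)
  let groundtruthList : List Int := (PySem.List.pyRange 0 L 1).map (fun j =>
      counts.foldl (fun s row => s + PySem.List.pyGetD row j 0) 0)
  (counts, groundtruthList, L)

-- ===== PRECONDITION & SPEC =====
-- Pre_ excludes exactly the inputs where Python A raises IndexError: labels shorter than
-- groundTruth2, a label outside [-k, k), or a ground-truth value below -(max+1) (rows have
-- length max(0, max(groundTruth2)) + 1, so such a value is an invalid Python row index).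
def Pre_purityOfEachClass (labels : List Int) (groundTruth2 : List Int) (k : Int) (sorted : Bool) : Prop :=
  groundTruth2.length ≤ labels.length ∧
  (∀ x ∈ labels.take groundTruth2.length, -k ≤ x ∧ x < k) ∧
  (∀ x ∈ groundTruth2, -(groundTruth2.foldl max 0 + 1) ≤ x)
instance (labels : List Int) (groundTruth2 : List Int) (k : Int) (sorted : Bool) : Decidable (Pre_purityOfEachClass labels groundTruth2 k sorted) := by unfold Pre_purityOfEachClass; infer_instance
def pvWitness_purityOfEachClass : List Int × List Int × Int × Bool := ([0, 1, 0], [0, 2, 1], 2, true)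

def Spec_purityOfEachClass (labels : List Int) (groundTruth2 : List Int) (k : Int) (sorted : Bool) (out : List (List Int) × List Int × Int) : Prop := out = purityOfEachClass_alt labels groundTruth2 k sorted
instance (labels : List Int) (groundTruth2 : List Int) (k : Int) (sorted : Bool) (out : List (List Int) × List Int × Int) : Decidable (Spec_purityOfEachClass labels groundTruth2 k sorted out) := by unfold Spec_purityOfEachClass; infer_instance

-- ===== CLAIM (what is proved, stated in full; the proofs are below) =====
def Claim_equal_purityOfEachClass : Prop := ∀ (labels : List Int) (groundTruth2 : List Int) (k : Int) (sorted : Bool), Dom_purityOfEachClass labels groundTruth2 k sorted → Pre_purityOfEachClass labels groundTruth2 k sorted → Spec_purityOfEachClass labels groundTruth2 k sorted (purityOfEachClass labels groundTruth2 k sorted)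

-- ===== LEMMAS AND PROOFS =====
-- Python index resolution (the Nat position a valid Python index i refers to)
def pvRIdx (m : Nat) (i : Int) : Nat := if 0 ≤ i then i.toNat else m - (-i).toNat

theorem pvRIdx_lt {m : Nat} {i : Int} (h : PySem.Raise.InRange m i) : pvRIdx m i < m := by
  unfold pvRIdx; obtain ⟨h1, h2⟩ := h; split <;> omega

theorem pvRIdx_natCast (m : Nat) (a : Nat) : pvRIdx m (a : Int) = a := by
  simp [pvRIdx]

theorem pvGetD_r {α : Type} (xs : List α) (i : Int) (d : α) (h : PySem.Raise.InRange xs.length i) :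
    PySem.List.pyGetD xs i d = xs.getD (pvRIdx xs.length i) d := by
  unfold pvRIdx
  simp only [PySem.List.pyGetD, PySem.List.pyGet?, PySem.List.pyIdx?]
  obtain ⟨h1, h2⟩ := h
  split_ifs with hp <;> simp_all <;> rw [List.getD_eq_getElem?_getD]

theorem pvSetD_r {α : Type} (xs : List α) (i : Int) (v : α) (h : PySem.Raise.InRange xs.length i) :
    PySem.List.pySetD xs i v = xs.set (pvRIdx xs.length i) v := by
  unfold pvRIdx
  simp only [PySem.List.pySetD, PySem.List.pySet?, PySem.List.pyIdx?]
  obtain ⟨h1, h2⟩ := h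
  split_ifs with hp <;> simp_all

theorem pvSet_map_range {α : Type} (m : Nat) (f : Nat → α) (a : Nat) (v : α) (ha : a < m) :
    ((List.range m).map f).set a v = (List.range m).map (fun i => if i = a then v else f i) := by
  apply List.ext_getElem
  · simp
  · intro n h1 h2
    simp only [List.getElem_set, List.getElem_map, List.getElem_range]
    simp only [List.length_set, List.length_map, List.length_range] at h1
    by_cases hn : n = a <;> simp [hn]
    exact fun h => absurd h.symm hn

theorem pvGetD_map_range {α : Type} (m : Nat) (f : Nat → α) (a : Nat) (d : α) (ha : a < m) :
    ((List.range m).map f).getD a d = f a := by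
  rw [List.getD_eq_getElem?_getD]
  simp [List.getElem?_range, ha]

-- loop "for i in range(len(xs)): xs[i] = h(i, xs[i])" rewrites every cell once
theorem pvFoldl_set_range' {α : Type} (h : Nat → α → α) (d : α) :
    ∀ (suf pre : List α),
      (List.range' pre.length suf.length).foldl (fun acc i => acc.set i (h i (acc.getD i d))) (pre ++ suf)
      = pre ++ suf.mapIdx (fun j x => h (pre.length + j) x) := by
  intro suf
  induction suf with
  | nil => intro pre; simp
  | cons x xs ih =>
    intro pre
    rw [List.length_cons, List.range'_succ, List.foldl_cons]
    have hget : (pre ++ x :: xs).getD pre.length d = x := by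
      rw [List.getD_eq_getElem?_getD, List.getElem?_append_right (le_refl _)]
      simp
    have hset : ∀ v, (pre ++ x :: xs).set pre.length v = pre ++ v :: xs := by
      intro v
      rw [List.set_append_right _ _ (le_refl _)]
      simp
    rw [hget, hset]
    have h2 : pre ++ h pre.length x :: xs = (pre ++ [h pre.length x]) ++ xs := by simp
    have h3 : (pre ++ [h pre.length x]).length = pre.length + 1 := by simp
    rw [h2, ← h3, ih]
    simp [List.mapIdx_cons, Nat.add_assoc, Nat.add_comm 1]

theorem pvFoldl_set_range {α : Type} (h : Nat → α → α) (d : α) (xs : List α) :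
    (List.range xs.length).foldl (fun acc i => acc.set i (h i (acc.getD i d))) xs
      = xs.mapIdx h := by
  have := pvFoldl_set_range' h d xs []
  rw [List.range_eq_range']
  simpa using this

-- an inner loop that only rewrites row i
theorem pvFoldl_set_row {α γ : Type} (i : Nat) (d : α) (f : γ → α → α) :
    ∀ (js : List γ) (acc : List α), i < acc.length →
      js.foldl (fun a j => a.set i (f j (a.getD i d))) acc
      = acc.set i (js.foldl (fun r j => f j r) (acc.getD i d)) := by
  intro js
  induction js with
  | nil =>
    intro acc hi
    rw [List.foldl_nil, List.foldl_nil, List.getD_eq_getElem _ _ hi, List.set_getElem_self]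
  | cons j js ih =>
    intro acc hi
    rw [List.foldl_cons, List.foldl_cons]
    rw [ih _ (by simpa using hi)]
    rw [List.set_set]
    congr 1
    rw [List.getD_eq_getElem _ _ (by simpa using hi), List.getElem_set_self,
        List.getD_eq_getElem _ _ hi]

theorem pvMapIdx_const {α β : Type} (v : Nat → β) (xs : List α) :
    xs.mapIdx (fun j _ => v j) = (List.range xs.length).map v := by
  apply List.ext_getElem
  · simp
  · intro n h1 h2
    simp

-- "for j in range(L): row[j] = v j" on a row of length L builds the comprehension
theorem pvWriteAll {α : Type} (L : Nat) (v : Nat → α) (d : α) (row : List α) (hlen : row.length = L) :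
    (List.range L).foldl (fun r j => r.set j (v j)) row = (List.range L).map v := by
  subst hlen
  have := pvFoldl_set_range (fun j _ => v j) d row
  simp only at this
  rw [this, pvMapIdx_const]

-- the bucket-building loop produces, for each cluster, the filtered index list
theorem pvBuckets (labels : List Int) (K : Nat) :
    ∀ (ts : List Nat) (base : Nat → List Int),
      (∀ t ∈ ts, PySem.Raise.InRange K (labels.getD t 0)) →
      ts.foldl (fun acc t => PySem.List.pySetD acc (labels.getD t 0)
          ((PySem.List.pyGetD acc (labels.getD t 0) []) ++ [(t : Int)]))
        ((List.range K).map base)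
      = (List.range K).map (fun i => base i ++
          ((ts.filter (fun t => pvRIdx K (labels.getD t 0) == i)).map (fun t => (Nat.cast t : Int)))) := by
  intro ts
  induction ts with
  | nil => intro base _; simp
  | cons t ts ih =>
    intro base hin
    have ha : PySem.Raise.InRange K (labels.getD t 0) := hin t (by simp)
    have hlt : pvRIdx K (labels.getD t 0) < K := pvRIdx_lt ha
    rw [List.foldl_cons]
    rw [pvSetD_r _ _ _ (by simpa using ha), pvGetD_r _ _ _ (by simpa using ha)]
    simp only [List.length_map, List.length_range]
    rw [pvGetD_map_range _ _ _ _ hlt, pvSet_map_range _ _ _ _ hlt]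
    rw [ih _ (fun t' ht' => hin t' (by simp [ht']))]
    apply List.map_congr_left
    intro i hi
    rw [List.filter_cons]
    by_cases hia : pvRIdx K (labels.getD t 0) = i
    · rw [if_pos hia.symm, if_pos (by simp only [beq_iff_eq]; exact hia), hia]
      simp
    · rw [if_neg (fun h => hia h.symm), if_neg (by simp only [beq_iff_eq]; exact hia)]

-- the counting fold, in closed form: each cell counts its (label, truth) pairs
theorem pvFoldl_bump_closed (K LN : Nat) :
    ∀ (ps : List (Int × Int)) (base : Nat → Nat → Int),
      (∀ p ∈ ps, PySem.Raise.InRange K p.1 ∧ PySem.Raise.InRange LN p.2) →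
      ps.foldl (fun m p => PySem.List.pySetD m p.1 (pvBumpRow (PySem.List.pyGetD m p.1 []) p.2))
        ((List.range K).map (fun i => (List.range LN).map (base i)))
      = (List.range K).map (fun i => (List.range LN).map (fun j =>
          base i j + (ps.countP (fun p => pvRIdx K p.1 == i && pvRIdx LN p.2 == j) : Int))) := by
  intro ps
  induction ps with
  | nil => intro base _; simp
  | cons p ps ih =>
    intro base hin
    have ha : PySem.Raise.InRange K p.1 := (hin p (by simp)).1
    have hb : PySem.Raise.InRange LN p.2 := (hin p (by simp)).2
    have hlta : pvRIdx K p.1 < K := pvRIdx_lt ha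
    have hltb : pvRIdx LN p.2 < LN := pvRIdx_lt hb
    rw [List.foldl_cons]
    have hstep : PySem.List.pySetD ((List.range K).map (fun i => (List.range LN).map (base i))) p.1
        (pvBumpRow (PySem.List.pyGetD ((List.range K).map (fun i => (List.range LN).map (base i))) p.1 []) p.2)
        = (List.range K).map (fun i => (List.range LN).map
            (fun j => if i = pvRIdx K p.1 ∧ j = pvRIdx LN p.2 then base (pvRIdx K p.1) (pvRIdx LN p.2) + 1 else base i j)) := by
      rw [pvSetD_r _ _ _ (by simpa using ha), pvGetD_r _ _ _ (by simpa using ha)]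
      simp only [List.length_map, List.length_range]
      rw [pvGetD_map_range _ _ _ _ hlta]
      unfold pvBumpRow
      rw [pvSetD_r _ _ _ (by simpa using hb), pvGetD_r _ _ _ (by simpa using hb)]
      simp only [List.length_map, List.length_range]
      rw [pvGetD_map_range _ _ _ _ hltb, pvSet_map_range _ _ _ _ hltb, pvSet_map_range _ _ _ _ hlta]
      apply List.map_congr_left
      intro i _
      by_cases hi : i = pvRIdx K p.1
      · subst hi
        rw [if_pos rfl]
        apply List.map_congr_left
        intro j _
        by_cases hj : j = pvRIdx LN p.2 <;> simp [hj]
      · rw [if_neg hi]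
        apply List.map_congr_left
        intro j _
        simp [hi]
    rw [hstep,
        ih (fun i j => if i = pvRIdx K p.1 ∧ j = pvRIdx LN p.2 then base (pvRIdx K p.1) (pvRIdx LN p.2) + 1 else base i j)
           (fun p' hp' => hin p' (by simp [hp']))]
    apply List.map_congr_left
    intro i hi
    apply List.map_congr_left
    intro j hj
    rw [List.countP_cons]
    by_cases hia : i = pvRIdx K p.1
    · subst hia
      by_cases hjb : j = pvRIdx LN p.2
      · subst hjb
        simp
        push_cast
        ring
      · have hjb' : ¬ (pvRIdx LN p.2 = j) := fun h => hjb h.symm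
        simp [hjb, hjb']
    · have hia' : ¬ (pvRIdx K p.1 = i) := fun h => hia h.symm
      by_cases hjb : j = pvRIdx LN p.2
      · simp [hia, hia']
      · simp [hia, hia', hjb]

theorem pvMapIdx_map {α β : Type} (f : α → β) (xs : List α) :
    xs.mapIdx (fun _ x => f x) = xs.map f := by
  apply List.ext_getElem
  · simp
  · intro n h1 h2; simp

theorem pvZip (labels g : List Int) (h : g.length ≤ labels.length) :
    labels.zip g = (List.range g.length).map (fun t => (labels.getD t 0, g.getD t 0)) := by
  apply List.ext_getElem
  · simp [Nat.min_eq_right h]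
  · intro n h1 h2
    simp only [List.length_zip] at h1
    have hn : n < g.length := lt_of_lt_of_le h1 (min_le_right _ _)
    have hn2 : n < labels.length := lt_of_le_of_lt' h (by exact hn)
    simp [List.getElem_zip, List.getD_eq_getElem, hn, hn2]

theorem pvEnumRow {LN : Nat} (f : Nat → Int) :
    (PySem.List.enumerate ((List.range LN).map f) 0).map (fun jc => (jc.2, jc.1 + 1))
      = (List.range LN).map (fun j => (f j, (j : Int) + 1)) := by
  apply List.ext_getElem
  · simp [PySem.List.length_enumerate]
  · intro n h1 h2
    simp only [List.length_map, PySem.List.length_enumerate, List.length_range] at h1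
    simp [PySem.List.getElem_enumerate, h1]

-- a loop whose step rewrites exactly cell i (for any body with that property)
theorem pvFoldl_body_set' {α : Type} (b : List α → Nat → List α) (h : Nat → α → α) (d : α)
    (hb : ∀ (acc : List α) (i : Nat), i < acc.length → b acc i = acc.set i (h i (acc.getD i d))) :
    ∀ (suf pre : List α),
      (List.range' pre.length suf.length).foldl b (pre ++ suf)
      = pre ++ suf.mapIdx (fun j x => h (pre.length + j) x) := by
  intro suf
  induction suf with
  | nil => intro pre; simp
  | cons x xs ih =>
    intro pre
    rw [List.length_cons, List.range'_succ, List.foldl_cons]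
    rw [hb _ _ (by simp)]
    have hget : (pre ++ x :: xs).getD pre.length d = x := by
      rw [List.getD_eq_getElem?_getD, List.getElem?_append_right (le_refl _)]
      simp
    have hset : ∀ v, (pre ++ x :: xs).set pre.length v = pre ++ v :: xs := by
      intro v
      rw [List.set_append_right _ _ (le_refl _)]
      simp
    rw [hget, hset]
    have h2 : pre ++ h pre.length x :: xs = (pre ++ [h pre.length x]) ++ xs := by simp
    have h3 : (pre ++ [h pre.length x]).length = pre.length + 1 := by simp
    rw [h2, ← h3, ih]
    simp [List.mapIdx_cons, Nat.add_assoc, Nat.add_comm 1]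

theorem pvFoldl_body_set {α : Type} (b : List α → Nat → List α) (h : Nat → α → α) (d : α)
    (hb : ∀ (acc : List α) (i : Nat), i < acc.length → b acc i = acc.set i (h i (acc.getD i d)))
    (xs : List α) :
    (List.range xs.length).foldl b xs = xs.mapIdx h := by
  have := pvFoldl_body_set' b h d hb xs []
  rw [List.range_eq_range']
  simpa using this

-- Σ_{i ∈ range K} (if a = i then c else 0) = c, for a < K
theorem pvSum_ite (c : Nat) : ∀ (K a : Nat), a < K →
    (((List.range K).map (fun i => if a = i then c else 0)).sum) = c := by
  intro K
  induction K with
  | zero => intro a ha; omega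
  | succ K ih =>
    intro a ha
    rw [List.range_succ, List.map_append, List.sum_append]
    by_cases haK : a = K
    · subst haK
      have hz : ((List.range a).map (fun i => if a = i then c else 0)).sum = 0 := by
        apply List.sum_eq_zero
        intro x hx
        obtain ⟨i, hi, rfl⟩ := List.mem_map.mp hx
        have : i < a := List.mem_range.mp hi
        simp [Nat.ne_of_gt this]
      simp [hz]
    · have : a < K := by omega
      rw [ih a this]
      simp [haK]

theorem pvFoldl_body_setN {α : Type} (b : List α → Nat → List α) (h : Nat → α → α) (d : α)
    (hb : ∀ (acc : List α) (i : Nat), i < acc.length → b acc i = acc.set i (h i (acc.getD i d)))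
    (xs : List α) (n : Nat) (hn : xs.length = n) :
    (List.range n).foldl b xs = xs.mapIdx h := by
  subst hn
  exact pvFoldl_body_set b h d hb xs

theorem pvNested {α : Type} (K LN : Nat) (v : Nat → Nat → α) (base : Nat → List α)
    (hlen : ∀ i, (base i).length = LN) :
    (List.range K).foldl
        (fun acc i => (List.range LN).foldl (fun a j => a.set i ((a.getD i []).set j (v i j))) acc)
        ((List.range K).map base)
      = (List.range K).map (fun i => (List.range LN).map (v i)) := by
  rw [pvFoldl_body_setN _ (fun i row => (List.range LN).foldl (fun r j => r.set j (v i j)) row) ([] : List α)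
      (fun acc i hi => pvFoldl_set_row i ([] : List α) (fun j r => r.set j (v i j)) (List.range LN) acc hi)
      _ _ (by simp)]
  apply List.ext_getElem
  · simp
  · intro n h1 h2
    simp only [List.length_mapIdx, List.length_map, List.length_range] at h1
    rw [List.getElem_mapIdx]
    simp only [List.getElem_map, List.getElem_range]
    exact pvWriteAll LN (v n) (v n 0) _ (by simp [hlen])

-- canonical (proof-side) description of the confusion matrix pipeline
def pvRes (labels g : List Int) (K LN : Nat) (i j : Nat) : Int :=
  ((List.range g.length).countP
    (fun t => pvRIdx K (labels.getD t 0) == i && pvRIdx LN (g.getD t 0) == j) : Int)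

def pvRows (labels g : List Int) (K LN : Nat) (srt : Bool) : List (List (Int × Int)) :=
  let rows0 := (List.range K).map (fun i =>
    (List.range LN).map (fun j => (pvRes labels g K LN i j, (j : Int) + 1)))
  if srt then rows0.map (fun r => PySem.List.sorted2 r Prod.fst Prod.snd true) else rows0

def pvCF (labels g : List Int) (K LN : Nat) (srt : Bool) : List (List Int) × List Int × Int :=
  ((pvRows labels g K LN srt).map (fun r => r.map Prod.fst),
   (List.range LN).map (fun j =>
     ((pvRows labels g K LN srt).map (fun r => (r.getD j ((0 : Int), (0 : Int))).1)).sum),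
   (LN : Int))

theorem pvRows_length {labels g : List Int} {K LN : Nat} {srt : Bool} :
    (pvRows labels g K LN srt).length = K := by
  unfold pvRows
  by_cases h : srt <;> simp [h]

theorem pvRows_row_length {labels g : List Int} {K LN : Nat} {srt : Bool} :
    ∀ r ∈ pvRows labels g K LN srt, r.length = LN := by
  unfold pvRows
  by_cases h : srt <;> simp only [h, if_true, if_false, Bool.false_eq_true] <;>
    intro r hr <;> obtain ⟨r0, hr0, rfl⟩ := List.mem_map.mp hr
  · rw [(PySem.List.sorted2_perm _ _ _ _).length_eq]
    obtain ⟨i, _, rfl⟩ := List.mem_map.mp hr0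
    simp
  · simp
theorem pvB_eq (labels g : List Int) (k : Int) (srt : Bool)
    (hk : 0 ≤ k)
    (hlen : g.length ≤ labels.length)
    (hlab : ∀ x ∈ labels.take g.length, -k ≤ x ∧ x < k)
    (hgt : ∀ x ∈ g, -(g.foldl max 0 + 1) ≤ x) :
    purityOfEachClass_alt labels g k srt = pvCF labels g k.toNat (g.foldl max 0 + 1).toNat srt := by
  simp only [purityOfEachClass_alt, PySem.List.max?_id_cons, Option.getD_some]
  set M := g.foldl max 0 with hM
  have hM0 : 0 ≤ M := (PySem.List.le_foldl_max g 0).1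
  set K := k.toNat with hK
  set LN := (M + 1).toNat with hLN
  have hKk : (K : Int) = k := Int.toNat_of_nonneg hk
  have hLNL : (LN : Int) = M + 1 := Int.toNat_of_nonneg (by omega)
  have hmem : ∀ p ∈ (List.range g.length).map (fun t => (labels.getD t 0, g.getD t 0)),
      PySem.Raise.InRange K p.1 ∧ PySem.Raise.InRange LN p.2 := by
    intro p hp
    obtain ⟨t, ht, rfl⟩ := List.mem_map.mp hp
    have htn : t < g.length := List.mem_range.mp ht
    have htl : t < labels.length := lt_of_lt_of_le htn hlen
    have h1 : labels.getD t 0 = labels[t] := List.getD_eq_getElem _ _ htl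
    have h2 : g.getD t 0 = g[t] := List.getD_eq_getElem _ _ htn
    have hmem1 : labels[t] ∈ labels.take g.length := by
      have : labels[t] = (labels.take g.length)[t]'(by simp [htn, htl]) := by simp
      rw [this]; exact List.getElem_mem _
    obtain ⟨hx1, hx2⟩ := hlab _ hmem1
    have hg1 : -(M + 1) ≤ g[t] := hgt _ (List.getElem_mem _)
    have hg2 : g[t] ≤ M := (PySem.List.le_foldl_max g 0).2 _ (List.getElem_mem _)
    constructor
    · constructor <;> simp only [h1] <;> omega
    · constructor <;> simp only [h2] <;> omega
  have hmat : List.foldl (fun m p => PySem.List.pySetD m p.1 (pvBumpRow (PySem.List.pyGetD m p.1 []) p.2))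
        (List.map (fun _ => List.replicate LN (0 : Int)) (List.map (fun k : Nat => (k : Int)) (List.range K)))
        (labels.zip g)
      = (List.range K).map (fun i => (List.range LN).map (fun j => pvRes labels g K LN i j)) := by
    rw [List.map_map]
    have hinit : (List.range K).map ((fun _ => List.replicate LN (0 : Int)) ∘ (fun k : Nat => (k : Int)))
        = (List.range K).map (fun i => (List.range LN).map ((fun _ _ => (0 : Int)) i)) := by
      apply List.map_congr_left; intro i _
      simp [List.map_const']
    rw [hinit, pvZip labels g hlen]
    rw [pvFoldl_bump_closed K LN _ _ hmem]
    apply List.map_congr_left; intro i _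
    apply List.map_congr_left; intro j _
    rw [List.countP_map]
    unfold pvRes
    simp only [Function.comp, zero_add]
    rfl
  rw [← hKk, PySem.List.pyRange_zero_nat]
  rw [hmat]
  have hrows0 : List.map (fun row => List.map (fun jc => (jc.2, jc.1 + 1)) (PySem.List.enumerate row))
        ((List.range K).map (fun i => (List.range LN).map (fun j => pvRes labels g K LN i j)))
      = (List.range K).map (fun i => (List.range LN).map (fun j => (pvRes labels g K LN i j, (j : Int) + 1))) := by
    rw [List.map_map]
    apply List.map_congr_left; intro i _
    exact pvEnumRow (fun j => pvRes labels g K LN i j)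
  rw [hrows0]
  simp only [beq_iff_eq]
  have hRows : (if srt = true then
        List.map (fun r => PySem.List.sorted2 r Prod.fst Prod.snd true)
          ((List.range K).map (fun i => (List.range LN).map (fun j => (pvRes labels g K LN i j, (j : Int) + 1))))
      else (List.range K).map (fun i => (List.range LN).map (fun j => (pvRes labels g K LN i j, (j : Int) + 1))))
      = pvRows labels g K LN srt := by
    unfold pvRows; rfl
  rw [hRows]
  have hsums : (PySem.List.pyRange 0 (M + 1) 1).map (fun j =>
        List.foldl (fun s row => s + PySem.List.pyGetD row j 0) 0
          ((pvRows labels g K LN srt).map (fun r => List.map Prod.fst r)))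
      = (List.range LN).map (fun j => ((pvRows labels g K LN srt).map (fun r => (r.getD j ((0 : Int), (0 : Int))).1)).sum) := by
    rw [← hLNL, PySem.List.pyRange_zero_nat, List.map_map]
    apply List.map_congr_left; intro j hj
    have hjLN : j < LN := List.mem_range.mp hj
    simp only [Function.comp]
    rw [List.foldl_map, PySem.List.foldl_add, zero_add]
    congr 1
    apply List.map_congr_left; intro r hr
    have hjr : j < r.length := by rw [pvRows_row_length r hr]; exact hjLN
    rw [PySem.List.pyGetD_natCast, List.getD_eq_getElem _ _ (by simpa using hjr),
        List.getElem_map, List.getD_eq_getElem _ _ hjr]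
  rw [hsums, ← hLNL]
  unfold pvCF
  rfl

theorem pvMap_range_getD {α β : Type} (xs : List α) (d : α) (w : α → β) :
    (List.range xs.length).map (fun i => w (xs.getD i d)) = xs.map w := by
  apply List.ext_getElem
  · simp
  · intro n h1 h2
    simp only [List.length_map, List.length_range] at h1
    simp [List.getD_eq_getElem, h1]

theorem pvFoldl_range_getD {α β : Type} (xs : List α) (d : α) (h : β → α → β) (init : β) :
    (List.range xs.length).foldl (fun s i => h s (xs.getD i d)) init = xs.foldl h init := by
  induction xs using List.reverseRecOn generalizing init with
  | nil => simp
  | append_singleton ys x ih =>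
    rw [List.length_append, List.length_cons, List.length_nil, Nat.zero_add, List.range_succ,
        List.foldl_append, List.foldl_append]
    rw [PySem.List.foldl_congr_mem _ _ (fun s i => h s (ys.getD i d)) init
        (by intro acc i hi
            have : i < ys.length := List.mem_range.mp hi
            simp only [List.getD_eq_getElem?_getD, List.getElem?_append_left this])]
    rw [ih]
    simp [List.getD_append_right, le_refl]

def pvBkt (labels : List Int) (n K : Nat) (i : Nat) : List Int :=
  ((List.range n).filter (fun t => pvRIdx K (labels.getD t 0) == i)).map (fun t => (Nat.cast t : Int))

theorem pvCountA (labels g : List Int) (K LN : Nat) (i j : Nat) (hi : i < K) :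
    List.countP (fun p => pvRIdx K p.1 == i && pvRIdx LN p.2 == j)
      ((List.range K).flatMap (fun i' =>
        ((List.range g.length).filter (fun t => pvRIdx K (labels.getD t 0) == i')).map
          (fun t => ((i' : Int), g.getD t 0))))
    = (List.range g.length).countP
        (fun t => pvRIdx K (labels.getD t 0) == i && pvRIdx LN (g.getD t 0) == j) := by
  rw [List.countP_flatMap]
  have hmapc : (List.range K).map
        ((List.countP (fun p => pvRIdx K p.1 == i && pvRIdx LN p.2 == j)) ∘ (fun i' =>
          ((List.range g.length).filter (fun t => pvRIdx K (labels.getD t 0) == i')).map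
            (fun t => ((i' : Int), g.getD t 0))))
      = (List.range K).map (fun i' => if i = i' then
          (List.range g.length).countP
            (fun t => pvRIdx K (labels.getD t 0) == i && pvRIdx LN (g.getD t 0) == j)
          else 0) := by
    apply List.map_congr_left
    intro i' _
    simp only [Function.comp]
    rw [List.countP_map, List.countP_filter]
    by_cases hii : i = i'
    · subst hii
      rw [if_pos rfl]
      apply List.countP_congr
      intro t _
      simp [pvRIdx_natCast, Bool.and_comm]
    · rw [if_neg hii]
      rw [List.countP_eq_zero]
      intro t _
      simp [pvRIdx_natCast]
      intro h1 _ 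
      exact absurd h1.symm hii
  rw [hmapc, pvSum_ite _ K i hi]

theorem pvA_eq (labels g : List Int) (k : Int) (srt : Bool)
    (hk : 0 ≤ k)
    (hlen : g.length ≤ labels.length)
    (hlab : ∀ x ∈ labels.take g.length, -k ≤ x ∧ x < k)
    (hgt : ∀ x ∈ g, -(g.foldl max 0 + 1) ≤ x) :
    purityOfEachClass labels g k srt = pvCF labels g k.toNat (g.foldl max 0 + 1).toNat srt := by
  simp only [purityOfEachClass]
  rw [PySem.List.foldl_pyRange_zero_pyGetD' g 0 (fun acc x => if acc < x then x else acc) 0]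
  have hfmax : List.foldl (fun acc x => if acc < x then x else acc) 0 g = g.foldl max 0 := by
    apply PySem.List.foldl_congr_mem
    intro acc x _
    rw [max_def]
    split_ifs <;> omega
  rw [hfmax]
  set M := g.foldl max 0 with hM
  have hM0 : 0 ≤ M := (PySem.List.le_foldl_max g 0).1
  set K := k.toNat with hK
  set LN := (M + 1).toNat with hLN
  have hKk : (K : Int) = k := Int.toNat_of_nonneg hk
  have hLNL : (LN : Int) = M + 1 := Int.toNat_of_nonneg (by omega)
  rw [← hKk, ← hLNL]
  simp only [PySem.List.pyRange_zero_nat, List.foldl_map, List.map_map,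
    PySem.List.pyGetD_natCast, PySem.List.pySetD_natCast, beq_iff_eq]
  have hlmem : ∀ t, t < g.length → PySem.Raise.InRange K (labels.getD t 0) := by
    intro t htn
    have htl : t < labels.length := lt_of_lt_of_le htn hlen
    have h1 : labels.getD t 0 = labels[t] := List.getD_eq_getElem _ _ htl
    have hmem1 : labels[t] ∈ labels.take g.length := by
      have : labels[t] = (labels.take g.length)[t]'(by simp [htn, htl]) := by simp
      rw [this]; exact List.getElem_mem _
    obtain ⟨hx1, hx2⟩ := hlab _ hmem1
    constructor <;> rw [h1] <;> omega
  have hgmem : ∀ t, t < g.length → PySem.Raise.InRange LN (g.getD t 0) := by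
    intro t htn
    have h2 : g.getD t 0 = g[t] := List.getD_eq_getElem _ _ htn
    have hg1 : -(M + 1) ≤ g[t] := hgt _ (List.getElem_mem _)
    have hg2 : g[t] ≤ M := (PySem.List.le_foldl_max g 0).2 _ (List.getElem_mem _)
    constructor <;> rw [h2] <;> omega
  have hdin : List.foldl (fun (x : List (List Int)) (_ : Nat) => x ++ [[]]) [] (List.range K)
      = (List.range K).map (fun _ => ([] : List Int)) := by
    rw [PySem.List.foldl_append_singleton_eq_map (fun _ => ([] : List Int)), List.nil_append]
  rw [hdin]
  have hdic : List.foldl (fun x y => PySem.List.pySetD x (labels.getD y 0)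
        (PySem.List.pyGetD x (labels.getD y 0) [] ++ [(y : Int)]))
        ((List.range K).map (fun _ => ([] : List Int))) (List.range g.length)
      = (List.range K).map (pvBkt labels g.length K) := by
    rw [pvBuckets labels K (List.range g.length) (fun _ => [])
        (fun t ht => hlmem t (List.mem_range.mp ht))]
    unfold pvBkt
    simp only [List.nil_append]
  rw [hdic]
  have hnin : List.foldl (fun (x : List (List Int)) (_ : Nat) => x ++ [List.replicate LN (0 : Int)]) [] (List.range K)
      = (List.range K).map (fun i => (List.range LN).map ((fun _ _ => (0 : Int)) i)) := by
    rw [PySem.List.foldl_append_singleton_eq_map (fun _ => List.replicate LN (0 : Int)), List.nil_append]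
    apply List.map_congr_left; intro i _
    simp [List.map_const']
  rw [hnin]
  have hcount : List.foldl
        (fun x y => List.foldl
          (fun x2 y3 => x2.set y (pvBumpRow (x2.getD y [])
            (PySem.List.pyGetD g
              ((((List.range K).map (pvBkt labels g.length K)).getD y []).getD y3 0) 0)))
          x (List.range (((List.range K).map (pvBkt labels g.length K)).getD y []).length))
        ((List.range K).map (fun i => (List.range LN).map ((fun _ _ => (0 : Int)) i)))
        (List.range K)
      = (List.range K).map (fun i => (List.range LN).map (fun j => pvRes labels g K LN i j)) := by
    have e1 : List.foldl
        (fun x y => List.foldl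
          (fun x2 y3 => x2.set y (pvBumpRow (x2.getD y [])
            (PySem.List.pyGetD g
              ((((List.range K).map (pvBkt labels g.length K)).getD y []).getD y3 0) 0)))
          x (List.range (((List.range K).map (pvBkt labels g.length K)).getD y []).length))
        ((List.range K).map (fun i => (List.range LN).map ((fun _ _ => (0 : Int)) i)))
        (List.range K)
        = List.foldl
        (fun x y => List.foldl
          (fun x2 y3 => x2.set y (pvBumpRow (x2.getD y [])
            (PySem.List.pyGetD g ((pvBkt labels g.length K y).getD y3 0) 0)))
          x (List.range (pvBkt labels g.length K y).length))
        ((List.range K).map (fun i => (List.range LN).map ((fun _ _ => (0 : Int)) i)))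
        (List.range K) := by
      apply PySem.List.foldl_congr_mem
      intro acc y hy
      rw [PySem.List.getD_map_range _ _ _ _ (List.mem_range.mp hy)]
    rw [e1]
    have e2 : List.foldl
        (fun x y => List.foldl
          (fun x2 y3 => x2.set y (pvBumpRow (x2.getD y [])
            (PySem.List.pyGetD g ((pvBkt labels g.length K y).getD y3 0) 0)))
          x (List.range (pvBkt labels g.length K y).length))
        ((List.range K).map (fun i => (List.range LN).map ((fun _ _ => (0 : Int)) i)))
        (List.range K)
        = List.foldl
        (fun x y => List.foldl
          (fun x2 t => x2.set y (pvBumpRow (x2.getD y []) (g.getD t 0)))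
          x ((List.range g.length).filter (fun t => pvRIdx K (labels.getD t 0) == y)))
        ((List.range K).map (fun i => (List.range LN).map ((fun _ _ => (0 : Int)) i)))
        (List.range K) := by
      apply PySem.List.foldl_congr_mem
      intro acc y hy
      rw [pvFoldl_range_getD (pvBkt labels g.length K y) 0
          (fun x2 t => x2.set y (pvBumpRow (x2.getD y []) (PySem.List.pyGetD g t 0))) acc]
      unfold pvBkt
      simp only [List.foldl_map, PySem.List.pyGetD_natCast]
    rw [e2]
    have e3 : ((List.range K).flatMap (fun i' =>
          ((List.range g.length).filter (fun t => pvRIdx K (labels.getD t 0) == i')).map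
            (fun t => ((i' : Int), g.getD t 0)))).foldl
          (fun m p => PySem.List.pySetD m p.1 (pvBumpRow (PySem.List.pyGetD m p.1 []) p.2))
          ((List.range K).map (fun i => (List.range LN).map ((fun _ _ => (0 : Int)) i)))
        = List.foldl
        (fun x y => List.foldl
          (fun x2 t => x2.set y (pvBumpRow (x2.getD y []) (g.getD t 0)))
          x ((List.range g.length).filter (fun t => pvRIdx K (labels.getD t 0) == y)))
        ((List.range K).map (fun i => (List.range LN).map ((fun _ _ => (0 : Int)) i)))
        (List.range K) := by
      rw [List.foldl_flatMap]
      apply PySem.List.foldl_congr_mem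
      intro acc y _
      rw [List.foldl_map]
      simp only [PySem.List.pySetD_natCast, PySem.List.pyGetD_natCast]
    rw [← e3]
    have hmemA : ∀ p ∈ (List.range K).flatMap (fun i' =>
          ((List.range g.length).filter (fun t => pvRIdx K (labels.getD t 0) == i')).map
            (fun t => ((i' : Int), g.getD t 0))),
        PySem.Raise.InRange K p.1 ∧ PySem.Raise.InRange LN p.2 := by
      intro p hp
      obtain ⟨y, hy, hp2⟩ := List.mem_flatMap.mp hp
      obtain ⟨t, ht, rfl⟩ := List.mem_map.mp hp2
      have hyK : y < K := List.mem_range.mp hy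
      have htn : t < g.length := List.mem_range.mp (List.mem_filter.mp ht).1
      exact ⟨⟨by omega, by omega⟩, hgmem t htn⟩
    rw [pvFoldl_bump_closed K LN _ _ hmemA]
    apply List.map_congr_left; intro i hi
    apply List.map_congr_left; intro j _
    rw [pvCountA labels g K LN i j (List.mem_range.mp hi)]
    simp only [zero_add]
    rfl
  rw [hcount]
  have hfin0 : List.foldl (fun (x : List (List (Int × Int))) (_ : Nat) => x ++ [List.replicate LN ((0 : Int), (0 : Int))]) [] (List.range K)
      = (List.range K).map (fun _ => List.replicate LN ((0 : Int), (0 : Int))) := by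
    rw [PySem.List.foldl_append_singleton_eq_map (fun _ => List.replicate LN ((0 : Int), (0 : Int))), List.nil_append]
  rw [hfin0]
  have hbuild : List.foldl (fun x y =>
        List.foldl (fun x2 y2 => x2.set y ((x2.getD y []).set y2
            ((((List.range K).map (fun i => (List.range LN).map (fun j => pvRes labels g K LN i j))).getD y []).getD y2 0,
              (y2 : Int) + 1)))
          x (List.range LN))
        ((List.range K).map (fun _ => List.replicate LN ((0 : Int), (0 : Int)))) (List.range K)
      = (List.range K).map (fun i => (List.range LN).map (fun j => (pvRes labels g K LN i j, (j : Int) + 1))) := by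
    rw [pvNested K LN
        (fun y y2 => ((((List.range K).map (fun i => (List.range LN).map (fun j => pvRes labels g K LN i j))).getD y []).getD y2 0, (y2 : Int) + 1))
        (fun _ => List.replicate LN ((0 : Int), (0 : Int))) (fun _ => by simp)]
    apply List.map_congr_left; intro i hi
    apply List.map_congr_left; intro j hj
    rw [PySem.List.getD_map_range _ _ _ _ (List.mem_range.mp hi),
        PySem.List.getD_map_range _ _ _ _ (List.mem_range.mp hj)]
  rw [hbuild]
  have hsort : List.foldl (fun x y => x.set y (PySem.List.sorted2 (x.getD y []) Prod.fst Prod.snd true))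
        ((List.range K).map (fun i => (List.range LN).map (fun j => (pvRes labels g K LN i j, (j : Int) + 1))))
        (List.range K)
      = ((List.range K).map (fun i => (List.range LN).map (fun j => (pvRes labels g K LN i j, (j : Int) + 1)))).map
          (fun r => PySem.List.sorted2 r Prod.fst Prod.snd true) := by
    rw [pvFoldl_body_setN _ (fun _ r => PySem.List.sorted2 r Prod.fst Prod.snd true) []
        (fun acc i hi => rfl) _ K (by simp)]
    rw [pvMapIdx_map]
  rw [hsort]
  have hrowsIf : (if srt = true then
        ((List.range K).map (fun i => (List.range LN).map (fun j => (pvRes labels g K LN i j, (j : Int) + 1)))).map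
          (fun r => PySem.List.sorted2 r Prod.fst Prod.snd true)
      else (List.range K).map (fun i => (List.range LN).map (fun j => (pvRes labels g K LN i j, (j : Int) + 1))))
      = pvRows labels g K LN srt := by
    unfold pvRows
    rfl
  rw [hrowsIf]
  have hFlen : (pvRows labels g K LN srt).length = K := pvRows_length
  have hFrow : ∀ r ∈ pvRows labels g K LN srt, r.length = LN := pvRows_row_length
  have hwb : List.foldl (fun x y =>
        List.foldl (fun x2 y1 => x2.set y ((x2.getD y []).set y1
            (((pvRows labels g K LN srt).getD y []).getD y1 ((0 : Int), (0 : Int))).1))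
          x (List.range LN))
        ((List.range K).map (fun i => (List.range LN).map (fun j => pvRes labels g K LN i j))) (List.range K)
      = (pvRows labels g K LN srt).map (fun r => r.map Prod.fst) := by
    rw [pvNested K LN
        (fun y y1 => (((pvRows labels g K LN srt).getD y []).getD y1 ((0 : Int), (0 : Int))).1)
        (fun i => (List.range LN).map (fun j => pvRes labels g K LN i j)) (fun _ => by simp)]
    apply List.ext_getElem
    · simp [hFlen]
    · intro n h1 h2
      simp only [List.length_map, List.length_range] at h1
      have hnF : n < (pvRows labels g K LN srt).length := by rw [hFlen]; exact h1
      simp only [List.getElem_map, List.getElem_range]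
      have hgd : (pvRows labels g K LN srt).getD n [] = (pvRows labels g K LN srt)[n] :=
        List.getD_eq_getElem _ _ hnF
      rw [hgd]
      apply List.ext_getElem
      · simp [hFrow _ (List.getElem_mem hnF)]
      · intro m hm1 hm2
        simp only [List.length_map, List.length_range] at hm1
        have hmF : m < ((pvRows labels g K LN srt)[n]).length := by
          rw [hFrow _ (List.getElem_mem hnF)]; exact hm1
        simp only [List.getElem_map, List.getElem_range]
        rw [List.getD_eq_getElem _ _ hmF]
  rw [hwb]
  have hsums : List.foldl (fun x y =>
        x.set y (List.foldl (fun s y1 => s + (((pvRows labels g K LN srt).getD y1 []).getD y ((0 : Int), (0 : Int))).1)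
          0 (List.range K)))
        (List.replicate LN (0 : Int)) (List.range LN)
      = (List.range LN).map (fun j =>
          ((pvRows labels g K LN srt).map (fun r => (r.getD j ((0 : Int), (0 : Int))).1)).sum) := by
    rw [pvWriteAll LN
        (fun y => List.foldl (fun s y1 => s + (((pvRows labels g K LN srt).getD y1 []).getD y ((0 : Int), (0 : Int))).1) 0 (List.range K))
        0 _ (by simp)]
    apply List.map_congr_left; intro j _
    rw [PySem.List.foldl_add, zero_add]
    congr 1
    rw [show List.range K = List.range (pvRows labels g K LN srt).length by rw [hFlen]]
    exact pvMap_range_getD (pvRows labels g K LN srt) []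
      (fun row => (row.getD j ((0 : Int), (0 : Int))).1)
  rw [hsums]
  unfold pvCF
  rfl

theorem pvNeg_eq (labels : List Int) (k : Int) (srt : Bool) (hk : k ≤ 0) :
    purityOfEachClass labels [] k srt = purityOfEachClass_alt labels [] k srt := by
  have hk0 : PySem.List.pyRange 0 k 1 = [] := PySem.List.pyRange_one_eq_nil hk
  have h01 : PySem.List.pyRange 0 1 1 = [0] := by decide
  simp [purityOfEachClass, purityOfEachClass_alt, hk0, h01]
  constructor <;> decide

theorem pvMain (labels g : List Int) (k : Int) (srt : Bool)
    (hpre : Pre_purityOfEachClass labels g k srt) :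
    purityOfEachClass labels g k srt = purityOfEachClass_alt labels g k srt := by
  unfold Pre_purityOfEachClass at hpre
  obtain ⟨hlen, hlab, hgt⟩ := hpre
  by_cases hk : 0 ≤ k
  · rw [pvA_eq labels g k srt hk hlen hlab hgt, pvB_eq labels g k srt hk hlen hlab hgt]
  · have hg : g = [] := by
      cases g with
      | nil => rfl
      | cons x gs =>
        exfalso
        have h1 : 0 < labels.length := lt_of_lt_of_le (by simp) hlen
        have hmem : labels[0] ∈ labels.take (x :: gs).length := by
          have : labels[0] = (labels.take (x :: gs).length)[0]'(by simp [h1]) := by simp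
          rw [this]; exact List.getElem_mem _
        obtain ⟨ha, hb⟩ := hlab _ hmem
        omega
    subst hg
    exact pvNeg_eq labels k srt (by omega)


-- ===== VERDICT (by name: the statement is the Claim_ definition above) =====
theorem purityOfEachClass_spec : Claim_equal_purityOfEachClass := by
  intro labels g k srt _ hpre
  unfold Spec_purityOfEachClass
  exact pvMain labels g k srt hpre
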